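-- pv_equiv track=rewrite | github.com/yvonneyt903yv-debug/Agent | gps/publisher/publish_run.py | normalize_spacing
-- ===== SOURCE A (Python) =====
-- def normalize_spacing(text: str) -> str:
--     lines = [line.rstrip() for line in text.splitlines()]
--     out: list[str] = []
--     blank = 0
--     for line in lines:
--         if line.strip():
--             blank = 0
--             out.append(line)
--         else:
--             blank += 1
--             if blank <= 1:
--                 out.append("")
--     return "\n".join(out).strip() + "\n"
-- ===== SOURCE B (Python) =====
-- def normalize_spacing(text: str) -> str:
--     lines = [line.rstrip() for line in text.splitlines()]
--     kept = [cur for prev, cur in zip([""] + lines, lines)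
--             if cur.strip() or prev.strip()]
--     return "\n".join(kept).strip() + "\n"
-- ===== Notes on version B (the rewrite author's own statement) =====
-- stated objective: idiomatic
-- what changed: The stateful loop with a blank-line counter is replaced by a stateless comprehension that pairs each stripped line with its predecessor via zip and keeps a line unless both it and its predecessor are blank (the final strip() makes the leading-blank corner agree).
import Mathlib
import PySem

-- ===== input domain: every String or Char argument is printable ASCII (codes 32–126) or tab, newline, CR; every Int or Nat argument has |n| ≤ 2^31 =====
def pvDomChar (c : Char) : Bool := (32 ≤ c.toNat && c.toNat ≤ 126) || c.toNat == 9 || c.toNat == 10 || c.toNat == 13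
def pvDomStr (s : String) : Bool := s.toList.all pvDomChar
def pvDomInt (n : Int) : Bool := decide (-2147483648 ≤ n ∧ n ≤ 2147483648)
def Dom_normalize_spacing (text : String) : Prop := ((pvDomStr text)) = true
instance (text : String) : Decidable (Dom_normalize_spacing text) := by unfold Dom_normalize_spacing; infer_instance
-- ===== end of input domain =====

-- B replaces A's stateful blank-counter loop by a stateless zip-with-predecessor filter (idiomatic; same cost).

-- ===== PORT A =====
-- literal transliteration of A: rstrip each line, then a loop carrying (out, blank counter)
def normalize_spacing (text : String) : String :=
  let lines := (PySem.Str.splitlines text).map (fun line => PySem.Str.rstrip line)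
  let res := lines.foldl
    (fun (st : List String × Int) line =>
      if PySem.Str.strip line ≠ "" then (st.1 ++ [line], 0)
      else if st.2 + 1 ≤ 1 then (st.1 ++ [""], st.2 + 1)
      else (st.1, st.2 + 1))
    ([], 0)
  PySem.Str.strip (PySem.Str.join "\n" res.1) ++ "\n"

-- ===== PORT B =====
-- literal transliteration of B: pair each line with its predecessor, keep unless both blank
def normalize_spacing_alt (text : String) : String :=
  let lines := (PySem.Str.splitlines text).map (fun line => PySem.Str.rstrip line)
  let kept := ((("" :: lines).zip lines).filter
      (fun p => (PySem.Str.strip p.2 != "") || (PySem.Str.strip p.1 != ""))).map (·.2)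
  PySem.Str.strip (PySem.Str.join "\n" kept) ++ "\n"

-- ===== PRECONDITION & SPEC =====
def Spec_normalize_spacing (text : String) (out : String) : Prop := out = normalize_spacing_alt text
instance (text : String) (out : String) : Decidable (Spec_normalize_spacing text out) := by unfold Spec_normalize_spacing; infer_instance

-- ===== CLAIM (what is proved, stated in full; the proofs are below) =====
def Claim_equal_normalize_spacing : Prop := ∀ (text : String), Dom_normalize_spacing text → Spec_normalize_spacing text (normalize_spacing text)

-- ===== LEMMAS AND PROOFS =====

-- spec of A's loop: flag = "previous processed line was blank"
def pvProcA : List String → Bool → List String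
  | [], _ => []
  | l :: ls, pb =>
    if PySem.Str.strip l ≠ "" then l :: pvProcA ls false
    else if pb then pvProcA ls true else "" :: pvProcA ls true

-- spec of B's filter: carry the previous line
def pvProcB : List String → String → List String
  | [], _ => []
  | l :: ls, p =>
    if (PySem.Str.strip l != "") || (PySem.Str.strip p != "") then l :: pvProcB ls l
    else pvProcB ls l

theorem pvFoldA (ls : List String) (acc : List String) (b : Int) (hb : 0 ≤ b) :
    (ls.foldl
      (fun (st : List String × Int) line =>
        if PySem.Str.strip line ≠ "" then (st.1 ++ [line], 0)
        else if st.2 + 1 ≤ 1 then (st.1 ++ [""], st.2 + 1)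
        else (st.1, st.2 + 1))
      (acc, b)).1 = acc ++ pvProcA ls (decide (1 ≤ b)) := by
  induction ls generalizing acc b with
  | nil => simp [pvProcA]
  | cons l ls ih =>
    rw [List.foldl_cons]
    by_cases h : PySem.Str.strip l = ""
    · by_cases h1 : b + 1 ≤ (1:Int)
      · have hb0 : b = 0 := by omega
        subst hb0
        rw [if_neg (not_not_intro h), if_pos (by omega)]
        dsimp only
        rw [ih (acc ++ [""]) (0 + 1) (by omega)]
        simp [pvProcA, h]
      · rw [if_neg (not_not_intro h), if_neg h1]
        dsimp only
        rw [ih acc (b + 1) (by omega)]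
        have e1 : decide ((1:Int) ≤ b + 1) = true := by
          simp only [decide_eq_true_eq]; omega
        have e2 : decide ((1:Int) ≤ b) = true := by
          simp only [decide_eq_true_eq]; omega
        rw [e1, e2]
        simp [pvProcA, h]
    · rw [if_pos h]
      dsimp only
      rw [ih (acc ++ [l]) 0 (by omega)]
      simp [pvProcA, h]

theorem pvZipB (ls : List String) (p : String) :
    (((p :: ls).zip ls).filter
      (fun q => (PySem.Str.strip q.2 != "") || (PySem.Str.strip q.1 != ""))).map (·.2)
      = pvProcB ls p := by
  induction ls generalizing p with
  | nil => simp [pvProcB]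
  | cons l ls ih =>
    by_cases h : ((PySem.Str.strip l != "") || (PySem.Str.strip p != "")) = true
    · simp [List.zip_cons_cons, h, pvProcB, ih]
    · have hb : ((PySem.Str.strip l != "") || (PySem.Str.strip p != "")) = false := by
        simpa using h
      simp [List.zip_cons_cons, hb, pvProcB, ih]

theorem pvAll_of_stripNil (cs : List Char) (h : PySem.Chars.strip cs = []) :
    ∀ c ∈ cs, PySem.Chars.isspace c = true := by
  have h' : PySem.Chars.rstrip (PySem.Chars.lstrip cs) = [] := h
  unfold PySem.Chars.rstrip PySem.Chars.lstrip at h'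
  have h2 : List.dropWhile PySem.Chars.isspace (List.dropWhile PySem.Chars.isspace cs).reverse = [] := by
    have := congrArg List.reverse h'
    simpa using this
  rw [List.dropWhile_eq_nil_iff] at h2
  intro c hc
  rcases List.mem_append.mp (by
    rw [List.takeWhile_append_dropWhile (p := PySem.Chars.isspace)]; exact hc) with h3 | h3
  · exact List.mem_takeWhile_imp h3
  · exact h2 c (List.mem_reverse.mpr h3)

-- a line that is already rstripped and strips to empty IS the empty string
theorem pvBlankRstrip (l : String) (hl : PySem.Str.strip (PySem.Str.rstrip l) = "") :
    PySem.Str.rstrip l = "" := by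
  apply String.toList_inj.mp
  have h0 : PySem.Chars.strip (PySem.Chars.rstrip l.toList) = [] := by
    have := congrArg String.toList hl
    simpa using this
  have hall := pvAll_of_stripNil _ h0
  have hgoal : PySem.Chars.rstrip l.toList = ([] : List Char) := ?_
  · simpa using hgoal
  unfold PySem.Chars.rstrip at hall ⊢
  cases hy : List.dropWhile PySem.Chars.isspace l.toList.reverse with
  | nil => simp
  | cons a t =>
    exfalso
    have hne : List.dropWhile PySem.Chars.isspace l.toList.reverse ≠ [] := by simp [hy]
    have hfalse := List.head_dropWhile_not PySem.Chars.isspace hne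
    have htrue : PySem.Chars.isspace a = true := by
      apply hall
      rw [hy]; simp
    simp only [hy, List.head_cons] at hfalse
    simp [hfalse] at htrue

theorem pvProcAB (ls : List String) (p : String)
    (h : ∀ l ∈ ls, PySem.Str.strip l = "" → l = "") :
    pvProcA ls (PySem.Str.strip p == "") = pvProcB ls p := by
  induction ls generalizing p with
  | nil => simp [pvProcA, pvProcB]
  | cons l ls ih =>
    have hls : ∀ x ∈ ls, PySem.Str.strip x = "" → x = "" := fun x hx => h x (List.mem_cons_of_mem _ hx)
    have hempty : PySem.Str.strip "" = "" := by decide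
    by_cases hl : PySem.Str.strip l = ""
    · have hl0 : l = "" := h l (List.mem_cons_self) hl
      subst hl0
      have ihl := ih "" hls
      rw [show (PySem.Str.strip "" == "") = true by decide] at ihl
      by_cases hp : PySem.Str.strip p = ""
      · simp [pvProcA, pvProcB, hempty, hp, ihl]
      · simp [pvProcA, pvProcB, hempty, hp, ihl]
    · have ihl := ih l hls
      rw [show (PySem.Str.strip l == "") = false by simpa using hl] at ihl
      simp [pvProcA, pvProcB, hl, ihl]

theorem pvStripJoinBlankCons (xs : List (List Char)) :
    PySem.Chars.strip (PySem.Chars.join ['\n'] ([] :: xs)) =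
      PySem.Chars.strip (PySem.Chars.join ['\n'] xs) := by
  cases xs with
  | nil => rfl
  | cons y t =>
    have hj : PySem.Chars.join ['\n'] ([] :: y :: t) = '\n' :: PySem.Chars.join ['\n'] (y :: t) := by
      simp [PySem.Chars.join, List.intercalate]
    rw [hj]
    unfold PySem.Chars.strip PySem.Chars.lstrip
    simp [show PySem.Chars.isspace '\n' = true by decide]

theorem pvStripJoinBlankConsStr (xs : List String) :
    PySem.Str.strip (PySem.Str.join "\n" ("" :: xs)) =
      PySem.Str.strip (PySem.Str.join "\n" xs) := by
  apply String.toList_inj.mp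
  simpa using pvStripJoinBlankCons (xs.map String.toList)

theorem pvOuts (ls : List String) (h : ∀ l ∈ ls, PySem.Str.strip l = "" → l = "") :
    PySem.Str.strip (PySem.Str.join "\n" (pvProcA ls false)) =
      PySem.Str.strip (PySem.Str.join "\n" (pvProcB ls "")) := by
  cases ls with
  | nil => rfl
  | cons l t =>
    have hbt : ∀ x ∈ t, PySem.Str.strip x = "" → x = "" := fun x hx => h x (List.mem_cons_of_mem _ hx)
    have ihl := pvProcAB t l hbt
    by_cases hl : PySem.Str.strip l = ""
    · have hl0 : l = "" := h l (List.mem_cons_self) hl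
      rw [show (PySem.Str.strip l == "") = true by simpa using hl] at ihl
      have hA : pvProcA (l :: t) false = "" :: pvProcA t true := by simp [pvProcA, hl]
      have hB : pvProcB (l :: t) "" = pvProcB t l := by
        simp [pvProcB, hl0, show PySem.Str.strip "" = "" by decide]
      rw [hA, hB, pvStripJoinBlankConsStr, ihl]
    · rw [show (PySem.Str.strip l == "") = false by simpa using hl] at ihl
      have hA : pvProcA (l :: t) false = l :: pvProcA t false := by simp [pvProcA, hl]
      have hB : pvProcB (l :: t) "" = l :: pvProcB t l := by
        simp [pvProcB, show (PySem.Str.strip l != "") = true by simpa using hl]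
      rw [hA, hB, ihl]

-- ===== VERDICT (by name: the statement is the Claim_ definition above) =====
theorem normalize_spacing_spec : Claim_equal_normalize_spacing := by
  intro text _
  unfold Spec_normalize_spacing normalize_spacing normalize_spacing_alt
  dsimp only
  have hbl : ∀ l ∈ (PySem.Str.splitlines text).map (fun line => PySem.Str.rstrip line),
      PySem.Str.strip l = "" → l = "" := by
    intro l hl
    rcases List.mem_map.mp hl with ⟨x, _, rfl⟩
    exact pvBlankRstrip x
  rw [pvFoldA _ [] 0 (by omega), pvZipB]
  rw [List.nil_append]
  rw [show decide ((1:Int) ≤ 0) = false by decide]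
  rw [pvOuts _ hbl]
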